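-- pv_equiv track=rewrite | github.com/KLayout/klayout | macbuild/nightlyBuild.py | Get_Package_Options
-- ===== SOURCE A (Python) =====
-- def Get_Package_Options( targetDic, platform, srlDMG, makeflag ):
--     packOp = dict()
--
--     if makeflag:
--         flag = '-m'
--     else:
--         flag = '-c'
--
--     for qtVer in [5, 6]:
--         if qtVer == 5:
--             qtType = "Qt5"
--         elif qtVer == 6:
--             qtType = "Qt6"
--
--         for key in targetDic.keys():
--             target = targetDic[key]
--             if target == "std":
--                 packOp[(qtVer, "std", "r")] = [ '-p', 'ST-%sMP.pkg.macos-%s-release-RsysPsys' % (qtType.lower(), platform),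
--                                                 '-s', '%d' % srlDMG, '%s' % flag ]
--                 packOp[(qtVer, "std", "d")] = [ '-p', 'ST-%sMP.pkg.macos-%s-debug-RsysPsys'   % (qtType.lower(), platform),
--                                                 '-s', '%d' % srlDMG, '%s' % flag ]
--             elif target == "ports":
--                 packOp[(qtVer, "ports", "r")] = [ '-p', 'LW-%sMP.pkg.macos-%s-release-Rmp33Pmp312' % (qtType.lower(), platform),
--                                                   '-s', '%d' % srlDMG, '%s' % flag ]
--                 packOp[(qtVer, "ports", "d")] = [ '-p', 'LW-%sMP.pkg.macos-%s-debug-Rmp33Pmp312'   % (qtType.lower(), platform),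
--                                                   '-s', '%d' % srlDMG, '%s' % flag ]
--             elif target == "brew":
--                 packOp[(qtVer, "brew", "r")] = [ '-p', 'LW-%sBrew.pkg.macos-%s-release-Rhb34Phb312' % (qtType.lower(), platform),
--                                                  '-s', '%d' % srlDMG, '%s' % flag ]
--                 packOp[(qtVer, "brew", "d")] = [ '-p', 'LW-%sBrew.pkg.macos-%s-debug-Rhb34Phb312'   % (qtType.lower(), platform),
--                                                  '-s', '%d' % srlDMG, '%s' % flag ]
--             elif target == "brewHW":
--                 packOp[(qtVer, "brewHW", "r")] = [ '-p', 'HW-%sBrew.pkg.macos-%s-release-RsysPhb311' % (qtType.lower(), platform),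
--                                                    '-s', '%d' % srlDMG, '%s' % flag ]
--                 packOp[(qtVer, "brewHW", "d")] = [ '-p', 'HW-%sBrew.pkg.macos-%s-debug-RsysPhb311'   % (qtType.lower(), platform),
--                                                    '-s', '%d' % srlDMG, '%s' % flag ]
--             elif target == "ana3":
--                 packOp[(qtVer, "ana3", "r")] = [ '-p', 'LW-%sAna3.pkg.macos-%s-release-Rana3Pana3' % (qtType.lower(), platform),
--                                                  '-s', '%d' % srlDMG, '%s' % flag ]
--                 packOp[(qtVer, "ana3", "d")] = [ '-p', 'LW-%sAna3.pkg.macos-%s-debug-Rana3Pana3'   % (qtType.lower(), platform),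
--                                                  '-s', '%d' % srlDMG, '%s' % flag ]
--             elif target == "brewA":
--                 packOp[(qtVer, "brewA", "r")] = [ '-p', 'LW-%sBrew.pkg.macos-%s-release-Rhb34Phbauto' % (qtType.lower(), platform),
--                                                   '-s', '%d' % srlDMG, '%s' % flag ]
--                 packOp[(qtVer, "brewA", "d")] = [ '-p', 'LW-%sBrew.pkg.macos-%s-debug-Rhb34Phbauto'   % (qtType.lower(), platform),
--                                                   '-s', '%d' % srlDMG, '%s' % flag ]
--             elif target == "brewAHW":
--                 packOp[(qtVer, "brewAHW", "r")] = [ '-p', 'HW-%sBrew.pkg.macos-%s-release-RsysPhbauto' % (qtType.lower(), platform),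
--                                                     '-s', '%d' % srlDMG, '%s' % flag ]
--                 packOp[(qtVer, "brewAHW", "d")] = [ '-p', 'HW-%sBrew.pkg.macos-%s-debug-RsysPhbauto'   % (qtType.lower(), platform),
--                                                     '-s', '%d' % srlDMG, '%s' % flag ]
--             elif target == "pbrew":
--                 packOp[(qtVer, "pbrew", "r")] = [ '-p', 'LW-%sMP.pkg.macos-%s-release-Rhb34Phb312' % (qtType.lower(), platform),
--                                                   '-s', '%d' % srlDMG, '%s' % flag ]
--                 packOp[(qtVer, "pbrew", "d")] = [ '-p', 'LW-%sMP.pkg.macos-%s-debug-Rhb34Phb312'   % (qtType.lower(), platform),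
--                                                   '-s', '%d' % srlDMG, '%s' % flag ]
--             elif target == "pbrewHW":
--                 packOp[(qtVer, "pbrewHW", "r")] = [ '-p', 'HW-%sMP.pkg.macos-%s-release-RsysPhb311' % (qtType.lower(), platform),
--                                                     '-s', '%d' % srlDMG, '%s' % flag ]
--                 packOp[(qtVer, "pbrewHW", "d")] = [ '-p', 'HW-%sMP.pkg.macos-%s-debug-RsysPhb311'   % (qtType.lower(), platform),
--                                                     '-s', '%d' % srlDMG, '%s' % flag ]
--     return packOp
-- ===== SOURCE B (Python) =====
-- # Two-stage re-implementation: first DEDUPE the recognized target values into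
-- # `seen` (first-occurrence order), then emit the whole option dict as one pure
-- # product comprehension over (qtVer, seen target, mode) from a format-template
-- # table -- no mutating accumulator, no per-key dispatch, no re-insertion.
--
-- _FMT = {
--     "std":     'ST-%sMP.pkg.macos-%s-%s-RsysPsys',
--     "ports":   'LW-%sMP.pkg.macos-%s-%s-Rmp33Pmp312',
--     "brew":    'LW-%sBrew.pkg.macos-%s-%s-Rhb34Phb312',
--     "brewHW":  'HW-%sBrew.pkg.macos-%s-%s-RsysPhb311',
--     "ana3":    'LW-%sAna3.pkg.macos-%s-%s-Rana3Pana3',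
--     "brewA":   'LW-%sBrew.pkg.macos-%s-%s-Rhb34Phbauto',
--     "brewAHW": 'HW-%sBrew.pkg.macos-%s-%s-RsysPhbauto',
--     "pbrew":   'LW-%sMP.pkg.macos-%s-%s-Rhb34Phb312',
--     "pbrewHW": 'HW-%sMP.pkg.macos-%s-%s-RsysPhb311',
-- }
--
-- def Get_Package_Options(targetDic, platform, srlDMG, makeflag):
--     flag = '-m' if makeflag else '-c'
--     seen = []
--     for t in targetDic.values():
--         if t in _FMT and t not in seen:
--             seen.append(t)
--     return {(q, t, c): ['-p', _FMT[t] % ('qt%d' % q, platform, mode),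
--                         '-s', '%d' % srlDMG, flag]
--             for q in (5, 6)
--             for t in seen
--             for c, mode in (('r', 'release'), ('d', 'debug'))}
-- ===== Notes on version B (the rewrite author's own statement) =====
-- stated objective: alternative
-- what changed: Instead of A's mutating dict built by a 9-way elif dispatch with re-insertions for duplicate targets, B first dedupes the recognized target values into a first-occurrence list and then emits the whole result as one pure product comprehension over (qtVer, target, mode) from a format-template table; correctness rests on re-inserting an identical value at an existing key being a no-op.
import Mathlib
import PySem

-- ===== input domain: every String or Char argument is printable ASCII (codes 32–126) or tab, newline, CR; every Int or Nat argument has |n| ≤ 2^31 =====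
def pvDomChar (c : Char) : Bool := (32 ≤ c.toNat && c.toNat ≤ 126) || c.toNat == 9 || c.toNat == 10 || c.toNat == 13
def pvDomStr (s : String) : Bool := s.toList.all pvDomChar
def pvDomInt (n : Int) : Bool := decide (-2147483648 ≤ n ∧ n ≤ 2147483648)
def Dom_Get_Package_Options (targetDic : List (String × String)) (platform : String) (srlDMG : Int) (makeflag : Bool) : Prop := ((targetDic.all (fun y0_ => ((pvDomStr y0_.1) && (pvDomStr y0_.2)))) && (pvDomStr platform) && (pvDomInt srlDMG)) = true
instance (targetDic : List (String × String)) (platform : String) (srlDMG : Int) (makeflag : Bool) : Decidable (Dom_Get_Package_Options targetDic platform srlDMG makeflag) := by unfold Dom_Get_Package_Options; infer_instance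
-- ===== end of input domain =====

-- B rebuilds the same option dict by deduping the recognized targets first and then
-- emitting the dict as one pure product comprehension from a template table (objective: alternative).

-- ===== PORT A =====
-- dispatch step of A's inner loop: the 9-way elif chain on `target`
def pvStepA (platform : String) (srlDMG : Int) (flag : String) (qtVer : Int) (qtType : String)
    (packOp : PySem.Dict (Int × String × String) (List String)) (target : String) :
    PySem.Dict (Int × String × String) (List String) :=
  if target == "std" then
    (packOp.insert (qtVer, "std", "r") ["-p", "ST-" ++ PySem.Str.lower qtType ++ "MP.pkg.macos-" ++ platform ++ "-release-RsysPsys", "-s", PySem.Int.toStr srlDMG, flag]).insert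
      (qtVer, "std", "d") ["-p", "ST-" ++ PySem.Str.lower qtType ++ "MP.pkg.macos-" ++ platform ++ "-debug-RsysPsys", "-s", PySem.Int.toStr srlDMG, flag]
  else if target == "ports" then
    (packOp.insert (qtVer, "ports", "r") ["-p", "LW-" ++ PySem.Str.lower qtType ++ "MP.pkg.macos-" ++ platform ++ "-release-Rmp33Pmp312", "-s", PySem.Int.toStr srlDMG, flag]).insert
      (qtVer, "ports", "d") ["-p", "LW-" ++ PySem.Str.lower qtType ++ "MP.pkg.macos-" ++ platform ++ "-debug-Rmp33Pmp312", "-s", PySem.Int.toStr srlDMG, flag]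
  else if target == "brew" then
    (packOp.insert (qtVer, "brew", "r") ["-p", "LW-" ++ PySem.Str.lower qtType ++ "Brew.pkg.macos-" ++ platform ++ "-release-Rhb34Phb312", "-s", PySem.Int.toStr srlDMG, flag]).insert
      (qtVer, "brew", "d") ["-p", "LW-" ++ PySem.Str.lower qtType ++ "Brew.pkg.macos-" ++ platform ++ "-debug-Rhb34Phb312", "-s", PySem.Int.toStr srlDMG, flag]
  else if target == "brewHW" then
    (packOp.insert (qtVer, "brewHW", "r") ["-p", "HW-" ++ PySem.Str.lower qtType ++ "Brew.pkg.macos-" ++ platform ++ "-release-RsysPhb311", "-s", PySem.Int.toStr srlDMG, flag]).insert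
      (qtVer, "brewHW", "d") ["-p", "HW-" ++ PySem.Str.lower qtType ++ "Brew.pkg.macos-" ++ platform ++ "-debug-RsysPhb311", "-s", PySem.Int.toStr srlDMG, flag]
  else if target == "ana3" then
    (packOp.insert (qtVer, "ana3", "r") ["-p", "LW-" ++ PySem.Str.lower qtType ++ "Ana3.pkg.macos-" ++ platform ++ "-release-Rana3Pana3", "-s", PySem.Int.toStr srlDMG, flag]).insert
      (qtVer, "ana3", "d") ["-p", "LW-" ++ PySem.Str.lower qtType ++ "Ana3.pkg.macos-" ++ platform ++ "-debug-Rana3Pana3", "-s", PySem.Int.toStr srlDMG, flag]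
  else if target == "brewA" then
    (packOp.insert (qtVer, "brewA", "r") ["-p", "LW-" ++ PySem.Str.lower qtType ++ "Brew.pkg.macos-" ++ platform ++ "-release-Rhb34Phbauto", "-s", PySem.Int.toStr srlDMG, flag]).insert
      (qtVer, "brewA", "d") ["-p", "LW-" ++ PySem.Str.lower qtType ++ "Brew.pkg.macos-" ++ platform ++ "-debug-Rhb34Phbauto", "-s", PySem.Int.toStr srlDMG, flag]
  else if target == "brewAHW" then
    (packOp.insert (qtVer, "brewAHW", "r") ["-p", "HW-" ++ PySem.Str.lower qtType ++ "Brew.pkg.macos-" ++ platform ++ "-release-RsysPhbauto", "-s", PySem.Int.toStr srlDMG, flag]).insert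
      (qtVer, "brewAHW", "d") ["-p", "HW-" ++ PySem.Str.lower qtType ++ "Brew.pkg.macos-" ++ platform ++ "-debug-RsysPhbauto", "-s", PySem.Int.toStr srlDMG, flag]
  else if target == "pbrew" then
    (packOp.insert (qtVer, "pbrew", "r") ["-p", "LW-" ++ PySem.Str.lower qtType ++ "MP.pkg.macos-" ++ platform ++ "-release-Rhb34Phb312", "-s", PySem.Int.toStr srlDMG, flag]).insert
      (qtVer, "pbrew", "d") ["-p", "LW-" ++ PySem.Str.lower qtType ++ "MP.pkg.macos-" ++ platform ++ "-debug-Rhb34Phb312", "-s", PySem.Int.toStr srlDMG, flag]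
  else if target == "pbrewHW" then
    (packOp.insert (qtVer, "pbrewHW", "r") ["-p", "HW-" ++ PySem.Str.lower qtType ++ "MP.pkg.macos-" ++ platform ++ "-release-RsysPhb311", "-s", PySem.Int.toStr srlDMG, flag]).insert
      (qtVer, "pbrewHW", "d") ["-p", "HW-" ++ PySem.Str.lower qtType ++ "MP.pkg.macos-" ++ platform ++ "-debug-RsysPhb311", "-s", PySem.Int.toStr srlDMG, flag]
  else packOp

def Get_Package_Options (targetDic : List (String × String)) (platform : String) (srlDMG : Int) (makeflag : Bool) : List (Int × String × String × List String) :=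
  let flag := if makeflag then "-m" else "-c"
  let dic := PySem.Dict.ofList targetDic
  let packOp : PySem.Dict (Int × String × String) (List String) :=
    ([(5 : Int), 6]).foldl (fun packOp qtVer =>
      let qtType := if qtVer == 5 then "Qt5" else "Qt6"
      dic.keys.foldl
        (fun packOp key => pvStepA platform srlDMG flag qtVer qtType packOp (dic.getD key ""))
        packOp)
      PySem.Dict.empty
  packOp.items.map (fun kv => (kv.1.1, kv.1.2.1, kv.1.2.2, kv.2))

-- ===== PORT B =====
-- B's _FMT table; each Python template 'X-%sY%s-%s-Z' is stored split at its three '%s'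
-- slots into its four literal pieces, and pvApplyFmt re-joins them (exact hand-port of '%').
def pvFmt : PySem.Dict String (String × String × String × String) := PySem.Dict.ofList
  [("std",     ("ST-", "MP.pkg.macos-",   "-", "-RsysPsys")),
   ("ports",   ("LW-", "MP.pkg.macos-",   "-", "-Rmp33Pmp312")),
   ("brew",    ("LW-", "Brew.pkg.macos-", "-", "-Rhb34Phb312")),
   ("brewHW",  ("HW-", "Brew.pkg.macos-", "-", "-RsysPhb311")),
   ("ana3",    ("LW-", "Ana3.pkg.macos-", "-", "-Rana3Pana3")),
   ("brewA",   ("LW-", "Brew.pkg.macos-", "-", "-Rhb34Phbauto")),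
   ("brewAHW", ("HW-", "Brew.pkg.macos-", "-", "-RsysPhbauto")),
   ("pbrew",   ("LW-", "MP.pkg.macos-",   "-", "-Rhb34Phb312")),
   ("pbrewHW", ("HW-", "MP.pkg.macos-",   "-", "-RsysPhb311"))]

def pvApplyFmt (p : String × String × String × String) (qtl platform mode : String) : String :=
  p.1 ++ qtl ++ p.2.1 ++ platform ++ p.2.2.1 ++ mode ++ p.2.2.2

def Get_Package_Options_alt (targetDic : List (String × String)) (platform : String) (srlDMG : Int) (makeflag : Bool) : List (Int × String × String × List String) :=
  let flag := if makeflag then "-m" else "-c"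
  -- stage 1: dedupe the recognized target values, first-occurrence order
  let seen := (PySem.Dict.ofList targetDic).values.foldl
      (fun s t => if pvFmt.contains t && !(s.contains t) then s ++ [t] else s) []
  -- stage 2: one pure product comprehension building the dict
  let pairs := ([(5 : Int), 6]).flatMap (fun q =>
    seen.flatMap (fun t =>
      ([("r", "release"), ("d", "debug")]).map (fun cm =>
        (((q, t, cm.1) : Int × String × String),
         ["-p", pvApplyFmt (pvFmt.getD t ("", "", "", "")) ("qt" ++ PySem.Int.toStr q) platform cm.2,
          "-s", PySem.Int.toStr srlDMG, flag]))))
  (PySem.Dict.ofList pairs).items.map (fun kv => (kv.1.1, kv.1.2.1, kv.1.2.2, kv.2))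

-- ===== PRECONDITION & SPEC =====
def Spec_Get_Package_Options (targetDic : List (String × String)) (platform : String) (srlDMG : Int) (makeflag : Bool) (out : List (Int × String × String × List String)) : Prop := out = Get_Package_Options_alt targetDic platform srlDMG makeflag
instance (targetDic : List (String × String)) (platform : String) (srlDMG : Int) (makeflag : Bool) (out : List (Int × String × String × List String)) : Decidable (Spec_Get_Package_Options targetDic platform srlDMG makeflag out) := by unfold Spec_Get_Package_Options; infer_instance

-- ===== CLAIM (what is proved, stated in full; the proofs are below) =====
def Claim_equal_Get_Package_Options : Prop := ∀ (targetDic : List (String × String)) (platform : String) (srlDMG : Int) (makeflag : Bool), Dom_Get_Package_Options targetDic platform srlDMG makeflag → Spec_Get_Package_Options targetDic platform srlDMG makeflag (Get_Package_Options targetDic platform srlDMG makeflag)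

-- ===== LEMMAS AND PROOFS =====

-- t is one of the nine recognized target names
def pvRecog (t : String) : Bool := pvFmt.contains t

-- the two (key, value) entries A writes for one recognized target (A's literal strings)
def pvEnt (platform : String) (srl : Int) (flag : String) (q : Int) (qtType : String) (t : String) :
    List ((Int × String × String) × List String) :=
  if t == "std" then
    [((q, "std", "r"), ["-p", "ST-" ++ PySem.Str.lower qtType ++ "MP.pkg.macos-" ++ platform ++ "-release-RsysPsys", "-s", PySem.Int.toStr srl, flag]),
     ((q, "std", "d"), ["-p", "ST-" ++ PySem.Str.lower qtType ++ "MP.pkg.macos-" ++ platform ++ "-debug-RsysPsys", "-s", PySem.Int.toStr srl, flag])]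
  else if t == "ports" then
    [((q, "ports", "r"), ["-p", "LW-" ++ PySem.Str.lower qtType ++ "MP.pkg.macos-" ++ platform ++ "-release-Rmp33Pmp312", "-s", PySem.Int.toStr srl, flag]),
     ((q, "ports", "d"), ["-p", "LW-" ++ PySem.Str.lower qtType ++ "MP.pkg.macos-" ++ platform ++ "-debug-Rmp33Pmp312", "-s", PySem.Int.toStr srl, flag])]
  else if t == "brew" then
    [((q, "brew", "r"), ["-p", "LW-" ++ PySem.Str.lower qtType ++ "Brew.pkg.macos-" ++ platform ++ "-release-Rhb34Phb312", "-s", PySem.Int.toStr srl, flag]),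
     ((q, "brew", "d"), ["-p", "LW-" ++ PySem.Str.lower qtType ++ "Brew.pkg.macos-" ++ platform ++ "-debug-Rhb34Phb312", "-s", PySem.Int.toStr srl, flag])]
  else if t == "brewHW" then
    [((q, "brewHW", "r"), ["-p", "HW-" ++ PySem.Str.lower qtType ++ "Brew.pkg.macos-" ++ platform ++ "-release-RsysPhb311", "-s", PySem.Int.toStr srl, flag]),
     ((q, "brewHW", "d"), ["-p", "HW-" ++ PySem.Str.lower qtType ++ "Brew.pkg.macos-" ++ platform ++ "-debug-RsysPhb311", "-s", PySem.Int.toStr srl, flag])]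
  else if t == "ana3" then
    [((q, "ana3", "r"), ["-p", "LW-" ++ PySem.Str.lower qtType ++ "Ana3.pkg.macos-" ++ platform ++ "-release-Rana3Pana3", "-s", PySem.Int.toStr srl, flag]),
     ((q, "ana3", "d"), ["-p", "LW-" ++ PySem.Str.lower qtType ++ "Ana3.pkg.macos-" ++ platform ++ "-debug-Rana3Pana3", "-s", PySem.Int.toStr srl, flag])]
  else if t == "brewA" then
    [((q, "brewA", "r"), ["-p", "LW-" ++ PySem.Str.lower qtType ++ "Brew.pkg.macos-" ++ platform ++ "-release-Rhb34Phbauto", "-s", PySem.Int.toStr srl, flag]),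
     ((q, "brewA", "d"), ["-p", "LW-" ++ PySem.Str.lower qtType ++ "Brew.pkg.macos-" ++ platform ++ "-debug-Rhb34Phbauto", "-s", PySem.Int.toStr srl, flag])]
  else if t == "brewAHW" then
    [((q, "brewAHW", "r"), ["-p", "HW-" ++ PySem.Str.lower qtType ++ "Brew.pkg.macos-" ++ platform ++ "-release-RsysPhbauto", "-s", PySem.Int.toStr srl, flag]),
     ((q, "brewAHW", "d"), ["-p", "HW-" ++ PySem.Str.lower qtType ++ "Brew.pkg.macos-" ++ platform ++ "-debug-RsysPhbauto", "-s", PySem.Int.toStr srl, flag])]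
  else if t == "pbrew" then
    [((q, "pbrew", "r"), ["-p", "LW-" ++ PySem.Str.lower qtType ++ "MP.pkg.macos-" ++ platform ++ "-release-Rhb34Phb312", "-s", PySem.Int.toStr srl, flag]),
     ((q, "pbrew", "d"), ["-p", "LW-" ++ PySem.Str.lower qtType ++ "MP.pkg.macos-" ++ platform ++ "-debug-Rhb34Phb312", "-s", PySem.Int.toStr srl, flag])]
  else if t == "pbrewHW" then
    [((q, "pbrewHW", "r"), ["-p", "HW-" ++ PySem.Str.lower qtType ++ "MP.pkg.macos-" ++ platform ++ "-release-RsysPhb311", "-s", PySem.Int.toStr srl, flag]),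
     ((q, "pbrewHW", "d"), ["-p", "HW-" ++ PySem.Str.lower qtType ++ "MP.pkg.macos-" ++ platform ++ "-debug-RsysPhb311", "-s", PySem.Int.toStr srl, flag])]
  else []

-- the two (key, value) entries B emits for one target (B's template form)
def pvEntB (platform : String) (srl : Int) (flag : String) (q : Int) (t : String) :
    List ((Int × String × String) × List String) :=
  ([("r", "release"), ("d", "debug")]).map (fun cm =>
    (((q, t, cm.1) : Int × String × String),
     ["-p", pvApplyFmt (pvFmt.getD t ("", "", "", "")) ("qt" ++ PySem.Int.toStr q) platform cm.2,
      "-s", PySem.Int.toStr srl, flag]))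

-- the recognized, not-yet-seen targets of ts, in order (what B's dedupe pass appends to s)
def pvNews : List String → List String → List String
  | [], _ => []
  | t :: ts, s => if pvRecog t && !(s.contains t) then t :: pvNews ts (s ++ [t]) else pvNews ts s

def pvKeys (q : Int) (N : List String) : List (Int × String × String) :=
  N.flatMap (fun t => [(q, t, "r"), (q, t, "d")])

theorem pvRecog_cases (t : String) (h : pvRecog t = true) :
    t = "std" ∨ t = "ports" ∨ t = "brew" ∨ t = "brewHW" ∨ t = "ana3" ∨ t = "brewA" ∨ t = "brewAHW" ∨ t = "pbrew" ∨ t = "pbrewHW" := by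
  have hk := (PySem.Dict.contains_iff_mem_keys pvFmt t).mp h
  have : pvFmt.keys = ["std", "ports", "brew", "brewHW", "ana3", "brewA", "brewAHW", "pbrew", "pbrewHW"] := by decide
  rw [this] at hk
  simpa using hk

theorem pvEnt_nil (platform : String) (srl : Int) (flag : String) (q : Int) (qtType : String)
    (t : String) (h : pvRecog t = false) : pvEnt platform srl flag q qtType t = [] := by
  have h1 : t ≠ "std" := fun ht => by subst ht; exact absurd h (by decide)
  have h2 : t ≠ "ports" := fun ht => by subst ht; exact absurd h (by decide)
  have h3 : t ≠ "brew" := fun ht => by subst ht; exact absurd h (by decide)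
  have h4 : t ≠ "brewHW" := fun ht => by subst ht; exact absurd h (by decide)
  have h5 : t ≠ "ana3" := fun ht => by subst ht; exact absurd h (by decide)
  have h6 : t ≠ "brewA" := fun ht => by subst ht; exact absurd h (by decide)
  have h7 : t ≠ "brewAHW" := fun ht => by subst ht; exact absurd h (by decide)
  have h8 : t ≠ "pbrew" := fun ht => by subst ht; exact absurd h (by decide)
  have h9 : t ≠ "pbrewHW" := fun ht => by subst ht; exact absurd h (by decide)
  simp [pvEnt, h1, h2, h3, h4, h5, h6, h7, h8, h9]

theorem pvEnt_fst (platform : String) (srl : Int) (flag : String) (q : Int) (qtType : String)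
    (t : String) (h : pvRecog t = true) :
    (pvEnt platform srl flag q qtType t).map Prod.fst = [(q, t, "r"), (q, t, "d")] := by
  rcases pvRecog_cases t h with h | h | h | h | h | h | h | h | h <;> subst h <;> rfl

-- A's step is: insert the pvEnt entries (in order)
theorem pvStepA_eq (platform : String) (srl : Int) (flag : String) (q : Int) (qtType : String)
    (d : PySem.Dict (Int × String × String) (List String)) (t : String) :
    pvStepA platform srl flag q qtType d t =
      (pvEnt platform srl flag q qtType t).foldl (fun d p => d.insert p.1 p.2) d := by
  by_cases hr : pvRecog t = true
  · rcases pvRecog_cases t hr with h | h | h | h | h | h | h | h | h <;> subst h <;> rfl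
  · rw [pvEnt_nil platform srl flag q qtType t (by revert hr; cases pvRecog t <;> simp)]
    have h1 : t ≠ "std" := fun ht => by subst ht; exact hr (by decide)
    have h2 : t ≠ "ports" := fun ht => by subst ht; exact hr (by decide)
    have h3 : t ≠ "brew" := fun ht => by subst ht; exact hr (by decide)
    have h4 : t ≠ "brewHW" := fun ht => by subst ht; exact hr (by decide)
    have h5 : t ≠ "ana3" := fun ht => by subst ht; exact hr (by decide)
    have h6 : t ≠ "brewA" := fun ht => by subst ht; exact hr (by decide)
    have h7 : t ≠ "brewAHW" := fun ht => by subst ht; exact hr (by decide)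
    have h8 : t ≠ "pbrew" := fun ht => by subst ht; exact hr (by decide)
    have h9 : t ≠ "pbrewHW" := fun ht => by subst ht; exact hr (by decide)
    simp [pvStepA, h1, h2, h3, h4, h5, h6, h7, h8, h9]

-- re-inserting an existing (key, value) pair leaves the dict unchanged
theorem pv_insert_same {κ ν : Type} [BEq κ] [LawfulBEq κ] (d : PySem.Dict κ ν) (k : κ) (v : ν)
    (hnd : d.keys.Nodup) (hg : d.get? k = some v) : d.insert k v = d := by
  have hc : d.contains k = true := by
    rcases h : d.contains k
    · rw [(PySem.Dict.get?_eq_none_iff_contains d k).mpr h] at hg; cases hg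
    · rfl
  apply PySem.Dict.ext
  rw [PySem.Dict.items_insert_of_contains d v hc]
  conv_rhs => rw [← List.map_id d.items]
  apply List.map_congr_left
  intro p hp
  rcases h : p.1 == k
  · simp
  · have hk : p.1 = k := by simpa using h
    have := PySem.Dict.get?_of_mem_items d (k := p.1) (v := p.2) (by simpa using hp) hnd
    rw [hk, hg] at this
    have hv : v = p.2 := by simpa using this
    simp [← hk, hv, -Prod.forall]

theorem pv_foldl_insert_id {κ ν : Type} [BEq κ] [LawfulBEq κ]
    (l : List (κ × ν)) (d : PySem.Dict κ ν) (hnd : d.keys.Nodup)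
    (h : ∀ p ∈ l, d.get? p.1 = some p.2) :
    l.foldl (fun d p => d.insert p.1 p.2) d = d := by
  induction l with
  | nil => rfl
  | cons p l ih =>
    simp only [List.foldl_cons]
    rw [pv_insert_same d p.1 p.2 hnd (h p (by simp))]
    exact ih (fun p hp => h p (by simp [hp]))

theorem pvNews_notin (ts : List String) : ∀ s, ∀ t ∈ pvNews ts s, pvRecog t = true ∧ t ∉ s := by
  induction ts with
  | nil => intro s t ht; simp [pvNews] at ht
  | cons a ts ih =>
    intro s t ht
    by_cases hc : (pvRecog a && !(s.contains a)) = true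
    · rw [pvNews, if_pos hc] at ht
      rcases List.mem_cons.mp ht with h | h
      · subst h
        simp only [Bool.and_eq_true, Bool.not_eq_true'] at hc
        exact ⟨hc.1, by simpa using hc.2⟩
      · have := ih (s ++ [a]) t h
        exact ⟨this.1, fun hs => this.2 (by simp [hs])⟩
    · rw [pvNews, if_neg hc] at ht
      exact ih s t ht

theorem pvNews_nodup (ts : List String) : ∀ s, (pvNews ts s).Nodup := by
  induction ts with
  | nil => intro s; simp [pvNews]
  | cons a ts ih =>
    intro s
    by_cases hc : (pvRecog a && !(s.contains a)) = true
    · rw [pvNews, if_pos hc]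
      refine List.nodup_cons.mpr ⟨fun h => ?_, ih (s ++ [a])⟩
      exact (pvNews_notin ts (s ++ [a]) a h).2 (by simp)
    · rw [pvNews, if_neg hc]; exact ih s

-- B's dedupe fold appends exactly pvNews
theorem pv_seen_eq (ts : List String) : ∀ s,
    ts.foldl (fun s t => if pvFmt.contains t && !(s.contains t) then s ++ [t] else s) s
      = s ++ pvNews ts s := by
  induction ts with
  | nil => intro s; simp [pvNews]
  | cons a ts ih =>
    intro s
    simp only [List.foldl_cons]
    by_cases hc : (pvFmt.contains a && !(s.contains a)) = true
    · rw [if_pos hc, ih (s ++ [a]), pvNews, if_pos (by exact hc)]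
      simp
    · rw [if_neg hc, ih s, pvNews, if_neg (by exact hc)]

theorem pvKeys_fst (q : Int) (N : List String) (k : Int × String × String) (h : k ∈ pvKeys q N) :
    k.1 = q ∧ k.2.1 ∈ N := by
  simp only [pvKeys, List.mem_flatMap] at h
  rcases h with ⟨t, ht, hk⟩
  simp only [List.mem_cons, List.not_mem_nil, or_false] at hk
  rcases hk with hk | hk <;> (subst hk; exact ⟨rfl, ht⟩)

theorem pvKeys_nodup (q : Int) (N : List String) (h : N.Nodup) : (pvKeys q N).Nodup := by
  induction N with
  | nil => simp [pvKeys]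
  | cons t N ih =>
    have hN := List.nodup_cons.mp h
    have : pvKeys q (t :: N) = [(q, t, "r"), (q, t, "d")] ++ pvKeys q N := by
      simp [pvKeys]
    rw [this]
    apply List.Nodup.append
    · simp
    · exact ih hN.2
    · intro k hk1 hk2
      simp only [List.mem_cons, List.not_mem_nil, or_false] at hk1
      have h1 : k.2.1 = t := by rcases hk1 with h | h <;> (subst h; rfl)
      exact hN.1 (h1 ▸ (pvKeys_fst q N k hk2).2)

-- the master loop lemma: one pass of A over targets ts, with seen-set s already in d,
-- appends exactly the entries of the newly seen targets
theorem pv_runA (platform : String) (srl : Int) (flag : String) (q : Int) (qtType : String) :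
    ∀ (ts s : List String) (d : PySem.Dict (Int × String × String) (List String)),
    d.keys.Nodup →
    (∀ t ∈ s, ∀ p ∈ pvEnt platform srl flag q qtType t, d.get? p.1 = some p.2) →
    (∀ t, pvRecog t = true → t ∉ s → ∀ c : String, d.contains (q, t, c) = false) →
    (ts.foldl (fun d t => pvStepA platform srl flag q qtType d t) d).items
      = d.items ++ (pvNews ts s).flatMap (pvEnt platform srl flag q qtType) := by
  intro ts
  induction ts with
  | nil => intro s d _ _ _; simp [pvNews]
  | cons t ts ih =>
    intro s d hnd h1 h2
    simp only [List.foldl_cons]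
    rw [pvStepA_eq]
    by_cases hr : pvRecog t = true
    · by_cases hm : t ∈ s
      · -- no-op: all of t's entries are already in d with the same values
        rw [pv_foldl_insert_id _ d hnd (h1 t hm)]
        rw [pvNews, if_neg (by simp [hr, hm])]
        exact ih s d hnd h1 h2
      · -- fresh insertion: items grow by pvEnt t
        have hfst := pvEnt_fst platform srl flag q qtType t hr
        have hfresh : ∀ p ∈ pvEnt platform srl flag q qtType t, d.contains p.1 = false := by
          intro p hp
          have : p.1 ∈ [(q, t, "r"), (q, t, "d")] := by
            rw [← hfst]; exact List.mem_map_of_mem hp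
          simp only [List.mem_cons, List.not_mem_nil, or_false] at this
          rcases this with h | h
          · rw [h]; exact h2 t hr hm "r"
          · rw [h]; exact h2 t hr hm "d"
        have hnodup : ((pvEnt platform srl flag q qtType t).map Prod.fst).Nodup := by
          rw [hfst]; simp
        have hitems :
            ((pvEnt platform srl flag q qtType t).foldl (fun d p => d.insert p.1 p.2) d).items
              = d.items ++ pvEnt platform srl flag q qtType t := by
          have := PySem.Dict.items_foldl_insert_fresh (pvEnt platform srl flag q qtType t)
            Prod.fst Prod.snd d hfresh hnodup
          simpa using this
        set d' := (pvEnt platform srl flag q qtType t).foldl (fun d p => d.insert p.1 p.2) d with hd'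
        have hnd' : d'.keys.Nodup :=
          PySem.Dict.nodup_keys_foldl_insert_key (pvEnt platform srl flag q qtType t)
            Prod.fst (fun _ p => p.2) d hnd
        have hkeys' : d'.keys = d.keys ++ [(q, t, "r"), (q, t, "d")] := by
          show d'.items.map Prod.fst = _
          rw [hitems, List.map_append, hfst]
          simp [PySem.Dict.keys]
        have h1' : ∀ t' ∈ s ++ [t], ∀ p ∈ pvEnt platform srl flag q qtType t', d'.get? p.1 = some p.2 := by
          intro t' ht' p hp
          rcases List.mem_append.mp ht' with ht' | ht'
          · have := PySem.Dict.mem_items_of_get?_eq_some d (h1 t' ht' p hp)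
            exact PySem.Dict.get?_of_mem_items d' (by rw [hitems]; exact List.mem_append_left _ (by simpa using this)) hnd'
          · have ht' : t' = t := by simpa using ht'
            subst ht'
            exact PySem.Dict.get?_of_mem_items d' (by rw [hitems]; exact List.mem_append_right _ (by simpa using hp)) hnd'
        have h2' : ∀ t', pvRecog t' = true → t' ∉ s ++ [t] → ∀ c : String, d'.contains (q, t', c) = false := by
          intro t' hr' hm' c
          have hts : t' ≠ t := fun h => hm' (by simp [h])
          have hns : t' ∉ s := fun h => hm' (by simp [h])
          rcases hcc : d'.contains (q, t', c)
          · rfl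
          · exfalso
            have := (PySem.Dict.contains_iff_mem_keys d' (q, t', c)).mp hcc
            rw [hkeys'] at this
            rcases List.mem_append.mp this with h | h
            · have := h2 t' hr' hns c
              rw [(PySem.Dict.contains_iff_mem_keys d (q, t', c)).mpr h] at this
              cases this
            · simp only [List.mem_cons, List.not_mem_nil, or_false] at h
              rcases h with h | h <;> exact hts (congrArg (fun x => x.2.1) h)
        rw [pvNews, if_pos (by simp [hr, hm])]
        rw [ih (s ++ [t]) d' hnd' h1' h2', hitems]
        simp [List.flatMap_cons]
    · -- unrecognized target: no entries, nothing seen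
      have hr' : pvRecog t = false := by revert hr; cases pvRecog t <;> simp
      rw [pvEnt_nil platform srl flag q qtType t hr']
      rw [pvNews, if_neg (by simp [hr'])]
      exact ih s d hnd h1 h2

-- A's inner loop over keys with a lookup is a loop over values
theorem pvInnerA (targetDic : List (String × String)) (platform : String) (srl : Int)
    (flag : String) (q : Int) (qtType : String) (p : PySem.Dict (Int × String × String) (List String)) :
    (PySem.Dict.ofList targetDic).keys.foldl
      (fun packOp key => pvStepA platform srl flag q qtType packOp ((PySem.Dict.ofList targetDic).getD key ""))
      p
    = (PySem.Dict.ofList targetDic).values.foldl (fun d t => pvStepA platform srl flag q qtType d t) p := by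
  rw [PySem.Dict.values_eq_map_keys _ (PySem.Dict.nodup_keys_ofList _) "", List.foldl_map]

-- string bridge: A's literal '%'-formatted string is B's template application
theorem pvStrEq (qtType : String) (q : Int) (hl : PySem.Str.lower qtType = "qt" ++ PySem.Int.toStr q)
    (a b s m e platform : String) (hs : s = "-" ++ m ++ e) :
    a ++ PySem.Str.lower qtType ++ b ++ platform ++ s
      = a ++ ("qt" ++ PySem.Int.toStr q) ++ b ++ platform ++ "-" ++ m ++ e := by
  rw [hl, hs]
  simp [String.append_assoc]

-- per-target: A's two entries equal B's two entries
theorem pvEnt_eq (platform : String) (srl : Int) (flag : String) (q : Int) (qtType : String)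
    (hl : PySem.Str.lower qtType = "qt" ++ PySem.Int.toStr q) (t : String) (hr : pvRecog t = true) :
    pvEnt platform srl flag q qtType t = pvEntB platform srl flag q t := by
  rcases pvRecog_cases t hr with h | h | h | h | h | h | h | h | h
  · subst h
    have hpc : pvFmt.getD "std" ("", "", "", "") = ("ST-", "MP.pkg.macos-", "-", "-RsysPsys") := by decide
    simp only [pvEntB, List.map_cons, List.map_nil, hpc, pvApplyFmt]
    norm_num [pvEnt]
    constructor <;> exact pvStrEq qtType q hl _ _ _ _ _ platform (by decide)
  · subst h
    have hpc : pvFmt.getD "ports" ("", "", "", "") = ("LW-", "MP.pkg.macos-", "-", "-Rmp33Pmp312") := by decide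
    simp only [pvEntB, List.map_cons, List.map_nil, hpc, pvApplyFmt]
    norm_num [pvEnt, (by decide : ("ports" : String) ≠ "std")]
    constructor <;> exact pvStrEq qtType q hl _ _ _ _ _ platform (by decide)
  · subst h
    have hpc : pvFmt.getD "brew" ("", "", "", "") = ("LW-", "Brew.pkg.macos-", "-", "-Rhb34Phb312") := by decide
    simp only [pvEntB, List.map_cons, List.map_nil, hpc, pvApplyFmt]
    norm_num [pvEnt, (by decide : ("brew" : String) ≠ "std"), (by decide : ("brew" : String) ≠ "ports")]
    constructor <;> exact pvStrEq qtType q hl _ _ _ _ _ platform (by decide)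
  · subst h
    have hpc : pvFmt.getD "brewHW" ("", "", "", "") = ("HW-", "Brew.pkg.macos-", "-", "-RsysPhb311") := by decide
    simp only [pvEntB, List.map_cons, List.map_nil, hpc, pvApplyFmt]
    norm_num [pvEnt, (by decide : ("brewHW" : String) ≠ "std"), (by decide : ("brewHW" : String) ≠ "ports"), (by decide : ("brewHW" : String) ≠ "brew")]
    constructor <;> exact pvStrEq qtType q hl _ _ _ _ _ platform (by decide)
  · subst h
    have hpc : pvFmt.getD "ana3" ("", "", "", "") = ("LW-", "Ana3.pkg.macos-", "-", "-Rana3Pana3") := by decide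
    simp only [pvEntB, List.map_cons, List.map_nil, hpc, pvApplyFmt]
    norm_num [pvEnt, (by decide : ("ana3" : String) ≠ "std"), (by decide : ("ana3" : String) ≠ "ports"), (by decide : ("ana3" : String) ≠ "brew"), (by decide : ("ana3" : String) ≠ "brewHW")]
    constructor <;> exact pvStrEq qtType q hl _ _ _ _ _ platform (by decide)
  · subst h
    have hpc : pvFmt.getD "brewA" ("", "", "", "") = ("LW-", "Brew.pkg.macos-", "-", "-Rhb34Phbauto") := by decide
    simp only [pvEntB, List.map_cons, List.map_nil, hpc, pvApplyFmt]
    norm_num [pvEnt, (by decide : ("brewA" : String) ≠ "std"), (by decide : ("brewA" : String) ≠ "ports"), (by decide : ("brewA" : String) ≠ "brew"), (by decide : ("brewA" : String) ≠ "brewHW"), (by decide : ("brewA" : String) ≠ "ana3")]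
    constructor <;> exact pvStrEq qtType q hl _ _ _ _ _ platform (by decide)
  · subst h
    have hpc : pvFmt.getD "brewAHW" ("", "", "", "") = ("HW-", "Brew.pkg.macos-", "-", "-RsysPhbauto") := by decide
    simp only [pvEntB, List.map_cons, List.map_nil, hpc, pvApplyFmt]
    norm_num [pvEnt, (by decide : ("brewAHW" : String) ≠ "std"), (by decide : ("brewAHW" : String) ≠ "ports"), (by decide : ("brewAHW" : String) ≠ "brew"), (by decide : ("brewAHW" : String) ≠ "brewHW"), (by decide : ("brewAHW" : String) ≠ "ana3"), (by decide : ("brewAHW" : String) ≠ "brewA")]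
    constructor <;> exact pvStrEq qtType q hl _ _ _ _ _ platform (by decide)
  · subst h
    have hpc : pvFmt.getD "pbrew" ("", "", "", "") = ("LW-", "MP.pkg.macos-", "-", "-Rhb34Phb312") := by decide
    simp only [pvEntB, List.map_cons, List.map_nil, hpc, pvApplyFmt]
    norm_num [pvEnt, (by decide : ("pbrew" : String) ≠ "std"), (by decide : ("pbrew" : String) ≠ "ports"), (by decide : ("pbrew" : String) ≠ "brew"), (by decide : ("pbrew" : String) ≠ "brewHW"), (by decide : ("pbrew" : String) ≠ "ana3"), (by decide : ("pbrew" : String) ≠ "brewA"), (by decide : ("pbrew" : String) ≠ "brewAHW")]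
    constructor <;> exact pvStrEq qtType q hl _ _ _ _ _ platform (by decide)
  · subst h
    have hpc : pvFmt.getD "pbrewHW" ("", "", "", "") = ("HW-", "MP.pkg.macos-", "-", "-RsysPhb311") := by decide
    simp only [pvEntB, List.map_cons, List.map_nil, hpc, pvApplyFmt]
    norm_num [pvEnt, (by decide : ("pbrewHW" : String) ≠ "std"), (by decide : ("pbrewHW" : String) ≠ "ports"), (by decide : ("pbrewHW" : String) ≠ "brew"), (by decide : ("pbrewHW" : String) ≠ "brewHW"), (by decide : ("pbrewHW" : String) ≠ "ana3"), (by decide : ("pbrewHW" : String) ≠ "brewA"), (by decide : ("pbrewHW" : String) ≠ "brewAHW"), (by decide : ("pbrewHW" : String) ≠ "pbrew")]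
    constructor <;> exact pvStrEq qtType q hl _ _ _ _ _ platform (by decide)

theorem pv_flatMap_congr {α β : Type} (l : List α) (f g : α → List β)
    (h : ∀ a ∈ l, f a = g a) : l.flatMap f = l.flatMap g := by
  induction l with
  | nil => rfl
  | cons a l ih =>
    simp only [List.flatMap_cons]
    rw [h a (by simp), ih (fun a ha => h a (by simp [ha]))]

-- ===== VERDICT (by name: the statement is the Claim_ definition above) =====
theorem Get_Package_Options_spec : Claim_equal_Get_Package_Options := by
  unfold Claim_equal_Get_Package_Options
  intro targetDic platform srl mk _
  unfold Spec_Get_Package_Options Get_Package_Options Get_Package_Options_alt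
  simp only [List.foldl_cons, List.foldl_nil]
  simp only [show ((5 : Int) == 5) = true from by decide, show ((6 : Int) == 5) = false from by decide,
    Bool.false_eq_true, if_true, if_false]
  generalize (if mk then "-m" else "-c") = flag
  rw [pvInnerA, pvInnerA]
  set vals := (PySem.Dict.ofList targetDic).values with hvals
  set N := pvNews vals [] with hN
  -- first pass (Qt5) from the empty dict
  have hrun5 := pv_runA platform srl flag 5 "Qt5" vals []
    (PySem.Dict.empty : PySem.Dict (Int × String × String) (List String))
    PySem.Dict.nodup_keys_empty (by intro t ht; cases ht)
    (by intro t _ _ c; exact PySem.Dict.contains_empty _)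
  set d1 := vals.foldl (fun d t => pvStepA platform srl flag 5 "Qt5" d t) PySem.Dict.empty with hd1
  have hitems1 : d1.items = N.flatMap (pvEnt platform srl flag 5 "Qt5") := by
    rw [hrun5]; rfl
  have hkeys1 : d1.keys = pvKeys 5 N := by
    show d1.items.map Prod.fst = _
    rw [hitems1]
    unfold pvKeys
    rw [List.map_flatMap]
    exact pv_flatMap_congr N _ _ (fun t ht =>
      pvEnt_fst platform srl flag 5 "Qt5" t (pvNews_notin vals [] t ht).1)
  have hnodupN : N.Nodup := pvNews_nodup vals []
  have hnd1 : d1.keys.Nodup := by rw [hkeys1]; exact pvKeys_nodup 5 N hnodupN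
  -- second pass (Qt6) on top of it: all its keys are fresh
  have hrun6 := pv_runA platform srl flag 6 "Qt6" vals [] d1 hnd1
    (by intro t ht; cases ht)
    (by
      intro t _ _ c
      rcases hcc : d1.contains (6, t, c)
      · rfl
      · exfalso
        have := (PySem.Dict.contains_iff_mem_keys d1 (6, t, c)).mp hcc
        rw [hkeys1] at this
        have := (pvKeys_fst 5 N _ this).1
        norm_num at this)
  rw [hrun6, hitems1]
  -- B's side: seen = N, and the comprehension's keys are all distinct
  rw [pv_seen_eq vals []]
  simp only [List.nil_append, ← hN]
  set pairsB := ([(5 : Int), 6]).flatMap (fun qv => N.flatMap (fun t => pvEntB platform srl flag qv t)) with hpairsB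
  have hshape : ([(5 : Int), 6]).flatMap (fun q =>
      N.flatMap (fun t =>
        ([("r", "release"), ("d", "debug")]).map (fun cm =>
          (((q, t, cm.1) : Int × String × String),
           ["-p", pvApplyFmt (pvFmt.getD t ("", "", "", "")) ("qt" ++ PySem.Int.toStr q) platform cm.2,
            "-s", PySem.Int.toStr srl, flag])))) = pairsB := rfl
  rw [hshape]
  have hfstB : pairsB.map Prod.fst = pvKeys 5 N ++ pvKeys 6 N := by
    rw [hpairsB]
    simp only [List.flatMap_cons, List.flatMap_nil, List.append_nil, List.map_append]
    congr 1 <;>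
      · rw [List.map_flatMap]
        unfold pvKeys
        refine pv_flatMap_congr N _ _ (fun t ht => ?_)
        rfl
  have hndB : (pairsB.map Prod.fst).Nodup := by
    rw [hfstB]
    apply List.Nodup.append (pvKeys_nodup 5 N hnodupN) (pvKeys_nodup 6 N hnodupN)
    intro k hk5 hk6
    have h5 := (pvKeys_fst 5 N k hk5).1
    have h6 := (pvKeys_fst 6 N k hk6).1
    rw [h5] at h6; norm_num at h6
  have hitemsB : (PySem.Dict.ofList pairsB).items = pairsB := by
    unfold PySem.Dict.ofList PySem.Dict.update
    have := PySem.Dict.items_foldl_insert_fresh pairsB Prod.fst Prod.snd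
      (PySem.Dict.empty : PySem.Dict (Int × String × String) (List String))
      (fun p _ => PySem.Dict.contains_empty _) hndB
    simpa using this
  rw [hitemsB]
  congr 1
  rw [hpairsB]
  simp only [List.flatMap_cons, List.flatMap_nil, List.append_nil]
  congr 1
  · exact pv_flatMap_congr N _ _ (fun t ht =>
      pvEnt_eq platform srl flag 5 "Qt5" (by decide) t (pvNews_notin vals [] t ht).1)
  · exact pv_flatMap_congr N _ _ (fun t ht =>
      pvEnt_eq platform srl flag 6 "Qt6" (by decide) t (pvNews_notin vals [] t ht).1)
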